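-- pv_equiv track=rewrite | github.com/gxot/tde-2-gestao-de-memoria-cache-comentado | Teste/Gestão de Memória.py | MRU
-- ===== SOURCE A (Python) =====
-- def MRU(sequencia, quadros):
--
--     #Inicia a variável "memoria"(array) e "falhas"(inteiro)
--     memoria = []
--     falhas = 0
--
--     #Itera sobre sequencia, cada iteração vira uma "página"
--     for pagina in sequencia:
--
--         #Confere se a "pagina" está no array "memoria"
--         if pagina in memoria:
--
--             #Remove a "pagina" de onde ela estiver no array "memoria"
--             #e realoca ela no final do array
--             memoria.remove(pagina)
--             memoria.append(pagina)
--         else: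
--             #Incrementa 1 na contagem de Page Fault
--             falhas += 1
--             #Confere se a quantidade de itens no array "memoria" é maior que a quantidade de quadros definidos
--             if len(memoria) >= quadros:
--                 #Remove a útima "pagina" do array "memoria"
--                 memoria.pop()
--             #Adiciona a "pagina" ao final do array "memoria"
--             memoria.append(pagina)
--     #Retorna os dados obtidos
--     return memoria, falhas
-- ===== SOURCE B (Python) =====
-- def MRU(sequencia, quadros):
--     # Dict page -> last-access timestamp; evict the key with the maximum
--     # timestamp (the most recently used) on a fault when memory is full.
--     tempo = {}
--     t = 0
--     falhas = 0
--     for pagina in sequencia: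
--         t += 1
--         if pagina in tempo:
--             tempo[pagina] = t
--         else:
--             falhas += 1
--             if len(tempo) >= quadros:
--                 del tempo[max(tempo, key=tempo.get)]
--             tempo[pagina] = t
--     memoria = sorted(tempo, key=tempo.get)
--     return memoria, falhas
-- ===== Notes on version B (the rewrite author's own statement) =====
-- stated objective: alternative
-- what changed: Replaces the recency-ordered list (membership scan + remove/append/pop on every access) with a dict mapping page to last-access timestamp; the MRU victim is the max-timestamp key and the final memory list is the keys sorted by timestamp.
import Mathlib
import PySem

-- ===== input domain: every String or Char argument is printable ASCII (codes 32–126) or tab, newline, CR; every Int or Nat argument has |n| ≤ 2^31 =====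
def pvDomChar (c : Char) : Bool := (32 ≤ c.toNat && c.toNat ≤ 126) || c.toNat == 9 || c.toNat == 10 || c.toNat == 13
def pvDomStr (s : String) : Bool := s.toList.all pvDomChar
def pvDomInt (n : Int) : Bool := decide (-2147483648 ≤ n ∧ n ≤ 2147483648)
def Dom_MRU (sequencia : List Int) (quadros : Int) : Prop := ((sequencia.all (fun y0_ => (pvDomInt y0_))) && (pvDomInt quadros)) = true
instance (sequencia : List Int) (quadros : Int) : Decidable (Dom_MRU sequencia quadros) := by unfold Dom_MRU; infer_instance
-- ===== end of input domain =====

-- B replaces A's recency-ordered list with a page -> last-access-timestamp dict: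
-- the MRU victim is the max-timestamp key and the final memory is the keys sorted
-- by timestamp (objective: alternative data structure, same cost).

-- ===== PORT A =====
-- one iteration of A's loop over 'sequencia'; state = (memoria, falhas)
def MRU_step (quadros : Int) (st : List Int × Int) (pagina : Int) : List Int × Int :=
  if st.1.contains pagina then
    -- memoria.remove(pagina); memoria.append(pagina)  (remove? is some: pagina is present)
    (((PySem.List.remove? st.1 pagina).getD st.1) ++ [pagina], st.2)
  else
    let memoria :=
      if quadros ≤ (st.1.length : Int) then
        -- memoria.pop(); none = IndexError on the empty list (excluded by Pre_MRU)
        match PySem.List.pop? st.1 with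
        | some (_, rest) => rest
        | none => st.1
      else st.1
    (memoria ++ [pagina], st.2 + 1)

def MRU (sequencia : List Int) (quadros : Int) : List Int × Int :=
  sequencia.foldl (MRU_step quadros) ([], 0)

-- ===== PORT B =====
-- one iteration of B's loop; state = (tempo, t, falhas)
def MRU_alt_step (quadros : Int) (st : PySem.Dict Int Int × Int × Int) (pagina : Int) :
    PySem.Dict Int Int × Int × Int :=
  let t := st.2.1 + 1
  if st.1.contains pagina then
    (st.1.insert pagina t, t, st.2.2)
  else
    let tempo :=
      if quadros ≤ (st.1.size : Int) then
        -- max(tempo, key=tempo.get); none = ValueError on the empty dict (excluded by Pre_MRU)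
        match PySem.List.max? st.1.keys (fun k => st.1.getD k 0) with
        | some m => st.1.erase m
        | none => st.1
      else st.1
    (tempo.insert pagina t, t, st.2.2 + 1)

def MRU_alt (sequencia : List Int) (quadros : Int) : List Int × Int :=
  let fin := sequencia.foldl (MRU_alt_step quadros) (PySem.Dict.empty, 0, 0)
  (PySem.List.sorted fin.1.keys (fun k => fin.1.getD k 0), fin.2.2)

-- ===== PRECONDITION & SPEC =====
-- Pre_ excludes nonempty sequences with quadros ≤ 0: there A's first miss calls
-- memoria.pop() on the empty list and raises IndexError (B raises ValueError there too).
def Pre_MRU (sequencia : List Int) (quadros : Int) : Prop := sequencia = [] ∨ 1 ≤ quadros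
instance (sequencia : List Int) (quadros : Int) : Decidable (Pre_MRU sequencia quadros) := by unfold Pre_MRU; infer_instance

def pvWitness_MRU : List Int × Int := ([1, 2, 1, 3], 2)

def Spec_MRU (sequencia : List Int) (quadros : Int) (out : List Int × Int) : Prop := out = MRU_alt sequencia quadros
instance (sequencia : List Int) (quadros : Int) (out : List Int × Int) : Decidable (Spec_MRU sequencia quadros out) := by unfold Spec_MRU; infer_instance

-- ===== CLAIM (what is proved, stated in full; the proofs are below) =====
def Claim_equal_MRU : Prop := ∀ (sequencia : List Int) (quadros : Int), Dom_MRU sequencia quadros → Pre_MRU sequencia quadros → Spec_MRU sequencia quadros (MRU sequencia quadros)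

-- ===== LEMMAS AND PROOFS =====

-- The coupling invariant after any number of iterations at "time" t:
-- A's memoria is nodup, the dict's keys are nodup and a permutation of memoria,
-- memoria is strictly increasing in last-access timestamp, and all timestamps are ≤ t.
def pvInv (t : Int) (mem : List Int) (d : PySem.Dict Int Int) : Prop :=
  mem.Nodup ∧ d.keys.Nodup ∧ d.keys.Perm mem ∧
  List.Pairwise (fun a b => d.getD a 0 < d.getD b 0) mem ∧
  ∀ k ∈ mem, d.getD k 0 ≤ t

lemma pvRemove_getD (mem : List Int) (p : Int) (hp : p ∈ mem) :
    (PySem.List.remove? mem p).getD mem = mem.erase p := by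
  rw [List.erase_eq_eraseIdx]
  simp only [PySem.List.remove?]
  cases h : List.idxOf? p mem with
  | none => exact absurd hp (List.idxOf?_eq_none_iff.mp h)
  | some i => simp

lemma pvPop_dropLast (mem : List Int) (h : mem ≠ []) :
    (match PySem.List.pop? mem with
     | some (_, rest) => rest
     | none => mem) = mem.dropLast := by
  have hl : 0 < mem.length := List.length_pos_iff.mpr h
  have hidx : PySem.List.pyIdx? mem.length (-1) = some (mem.length - 1) := by
    simp [PySem.List.pyIdx?]; omega
  have hget : mem[mem.length - 1]? = some (mem[mem.length - 1]'(by omega)) :=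
    List.getElem?_eq_getElem (by omega)
  simp [PySem.List.pop?, hidx, hget, List.eraseIdx_length_sub_one]

lemma pvKeys_erase (d : PySem.Dict Int Int) (m : Int) :
    (d.erase m).keys = d.keys.filter (fun x => !(x == m)) := by
  show (d.items.filter _).map _ = (d.items.map _).filter _
  induction d.items with
  | nil => rfl
  | cons p l ih =>
    by_cases hp : p.1 = m <;> simp [hp, ih]

lemma pvGet?_erase_of_ne (d : PySem.Dict Int Int) (m k : Int) (h : k ≠ m) :
    (d.erase m).get? k = d.get? k := by
  show Option.map _ ((d.items.filter _).find? _) = Option.map _ (d.items.find? _)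
  congr 1
  have hmk : (m == k) = false := by simp; omega
  induction d.items with
  | nil => rfl
  | cons p l ih =>
    by_cases hp : p.1 = m
    · simp [hp, hmk, ih]
    · by_cases hk : p.1 = k <;> simp [hp, hk, h, ih]

lemma pvGetD_erase_of_ne (d : PySem.Dict Int Int) (m k : Int) (h : k ≠ m) :
    (d.erase m).getD k 0 = d.getD k 0 := by
  rw [PySem.Dict.getD_eq_get?_getD, pvGet?_erase_of_ne d m k h, ← PySem.Dict.getD_eq_get?_getD]

lemma pvNodupAppendSingleton {l : List Int} {a : Int} (h : l.Nodup) (ha : a ∉ l) :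
    (l ++ [a]).Nodup := by
  simp only [List.nodup_append, List.nodup_singleton, true_and, h]
  intro b hb c hc heq
  exact ha ((heq.trans (List.mem_singleton.mp hc)) ▸ hb)

lemma pvStep_inv (quadros : Int) (hq : 1 ≤ quadros) (pagina t f : Int)
    (mem : List Int) (d : PySem.Dict Int Int) (h : pvInv t mem d) :
    (MRU_step quadros (mem, f) pagina).2 = (MRU_alt_step quadros (d, t, f) pagina).2.2 ∧
    (MRU_alt_step quadros (d, t, f) pagina).2.1 = t + 1 ∧
    pvInv (t + 1) (MRU_step quadros (mem, f) pagina).1 (MRU_alt_step quadros (d, t, f) pagina).1 := by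
  obtain ⟨hnd, hknd, hperm, hpw, hbnd⟩ := h
  by_cases hm : pagina ∈ mem
  -- ===== hit: pagina already in memory =====
  · have hA : mem.contains pagina = true := List.contains_iff_mem.mpr hm
    have hB : d.contains pagina = true :=
      (PySem.Dict.contains_iff_mem_keys d pagina).mpr (hperm.mem_iff.mpr hm)
    have hkeys : (d.insert pagina (t + 1)).keys = d.keys :=
      PySem.Dict.keys_insert_of_contains d _ hB
    have hgd : ∀ a : Int, (d.insert pagina (t + 1)).getD a 0 =
        if a = pagina then t + 1 else d.getD a 0 := fun a =>
      PySem.Dict.getD_insert d pagina a (t + 1) 0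
    have hnp : pagina ∉ mem.filter (fun x => x != pagina) := by simp
    simp only [MRU_step, MRU_alt_step, hA, hB, if_true]
    refine ⟨by trivial, by trivial, ?_, ?_, ?_, ?_, ?_⟩
    · rw [pvRemove_getD mem pagina hm, hnd.erase_eq_filter]
      exact pvNodupAppendSingleton (hnd.filter _) hnp
    · rw [hkeys]; exact hknd
    · rw [hkeys, pvRemove_getD mem pagina hm]
      exact hperm.trans ((List.perm_cons_erase hm).trans
        (List.perm_append_singleton _ _).symm)
    · rw [pvRemove_getD mem pagina hm, hnd.erase_eq_filter, List.pairwise_append]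
      refine ⟨?_, List.pairwise_singleton _ _, ?_⟩
      · refine (List.Pairwise.sublist List.filter_sublist hpw).imp_of_mem ?_
        intro a b ha hb hab
        have ha' : a ≠ pagina := by simpa using (List.mem_filter.mp ha).2
        have hb' : b ≠ pagina := by simpa using (List.mem_filter.mp hb).2
        rw [hgd a, hgd b, if_neg ha', if_neg hb']; exact hab
      · intro a ha b hb
        have hb' : b = pagina := by simpa using hb
        have ha' : a ≠ pagina := by simpa using (List.mem_filter.mp ha).2
        have ham : a ∈ mem := (List.mem_filter.mp ha).1
        rw [hgd a, hgd b, if_neg ha', hb', if_pos rfl]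
        have := hbnd a ham; omega
    · rw [pvRemove_getD mem pagina hm, hnd.erase_eq_filter]
      intro k hk
      rcases List.mem_append.mp hk with hk1 | hk2
      · have hk' : k ≠ pagina := by simpa using (List.mem_filter.mp hk1).2
        rw [hgd k, if_neg hk']
        have := hbnd k (List.mem_filter.mp hk1).1; omega
      · have hk' : k = pagina := by simpa using hk2
        rw [hgd k, if_pos hk']
  -- ===== miss: page fault =====
  · have hA : mem.contains pagina = false := by
      rw [Bool.eq_false_iff]; intro hc; exact hm (List.contains_iff_mem.mp hc)
    have hB : d.contains pagina = false := by
      rw [Bool.eq_false_iff]; intro hc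
      exact hm (hperm.mem_iff.mp ((PySem.Dict.contains_iff_mem_keys d pagina).mp hc))
    have hsize : (d.size : Int) = (mem.length : Int) := by
      have hk : d.keys.length = mem.length := hperm.length_eq
      simp only [PySem.Dict.keys, List.length_map] at hk
      simp [PySem.Dict.size, hk]
    by_cases hfull : quadros ≤ (mem.length : Int)
    -- ===== miss with eviction =====
    · have hne : mem ≠ [] := by
        intro hnil; rw [hnil] at hfull; simp at hfull; omega
      have hkne : d.keys ≠ [] := by
        intro hnil
        have := hperm.length_eq; rw [hnil] at this
        exact hne (List.eq_nil_of_length_eq_zero this.symm)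
      obtain ⟨m, hmmax⟩ : ∃ m, PySem.List.max? d.keys (fun k => d.getD k 0) = some m := by
        cases hc : PySem.List.max? d.keys (fun k => d.getD k 0) with
        | none => exact absurd ((PySem.List.max?_eq_none_iff _ _).mp hc) hkne
        | some m => exact ⟨m, rfl⟩
      have hsplit : mem.dropLast ++ [mem.getLast hne] = mem :=
        List.dropLast_append_getLast hne
      have hndsplit : (mem.dropLast ++ [mem.getLast hne]).Nodup := by rw [hsplit]; exact hnd
      have hlastnotin : mem.getLast hne ∉ mem.dropLast := by
        rw [List.nodup_append] at hndsplit
        intro hin; exact hndsplit.2.2 _ hin _ (List.mem_singleton_self _) rfl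
      have hcross : ∀ a ∈ mem.dropLast, d.getD a 0 < d.getD (mem.getLast hne) 0 := by
        have hpw' := hpw; rw [← hsplit, List.pairwise_append] at hpw'
        intro a ha; exact hpw'.2.2 a ha _ (List.mem_singleton_self _)
      have hm_eq : m = mem.getLast hne := by
        have hmmem : m ∈ mem := hperm.mem_iff.mp (PySem.List.max?_mem hmmax)
        have hlastmem : mem.getLast hne ∈ d.keys :=
          hperm.mem_iff.mpr (List.getLast_mem hne)
        have hle : d.getD (mem.getLast hne) 0 ≤ d.getD m 0 :=
          PySem.List.max?_isMax hmmax _ hlastmem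
        rw [← hsplit] at hmmem
        rcases List.mem_append.mp hmmem with h1 | h2
        · have := hcross m h1; omega
        · simpa using h2
      have hkeysE : (d.erase m).keys = d.keys.filter (fun x => !(x == mem.getLast hne)) := by
        rw [pvKeys_erase, hm_eq]
      have hfilter : mem.filter (fun x => !(x == mem.getLast hne)) = mem.dropLast := by
        rw [← congrArg (List.filter (fun x => !(x == mem.getLast hne))) hsplit,
          List.filter_append]
        have h1 : mem.dropLast.filter (fun x => !(x == mem.getLast hne)) = mem.dropLast :=
          List.filter_eq_self.mpr (fun a ha => by
            simp only [Bool.not_eq_eq_eq_not, Bool.not_true, beq_eq_false_iff_ne]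
            intro heq; exact hlastnotin (heq ▸ ha))
        have h2 : List.filter (fun x => !(x == mem.getLast hne)) [mem.getLast hne] = [] := by simp
        rw [h1, h2, List.append_nil]
      have hpermE : (d.erase m).keys.Perm mem.dropLast := by
        rw [hkeysE, ← hfilter]; exact hperm.filter _
      have hBE : (d.erase m).contains pagina = false := by
        rw [Bool.eq_false_iff]; intro hc
        have := (PySem.Dict.contains_iff_mem_keys _ pagina).mp hc
        rw [hkeysE] at this
        exact hm (hperm.mem_iff.mp (List.mem_of_mem_filter this))
      have hkeysI : ((d.erase m).insert pagina (t + 1)).keys = (d.erase m).keys ++ [pagina] :=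
        PySem.Dict.keys_insert_of_not_contains _ _ hBE
      have hgd : ∀ a : Int, a ≠ m →
          ((d.erase m).insert pagina (t + 1)).getD a 0 =
            if a = pagina then t + 1 else d.getD a 0 := by
        intro a ham
        rw [PySem.Dict.getD_insert]
        by_cases hap : a = pagina
        · simp [hap]
        · rw [if_neg hap, if_neg hap, pvGetD_erase_of_ne d m a ham]
      have hgdp : ((d.erase m).insert pagina (t + 1)).getD pagina 0 = t + 1 := by
        rw [PySem.Dict.getD_insert, if_pos rfl]
      have hmemdrop : ∀ a ∈ mem.dropLast, a ∈ mem :=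
        fun a ha => (List.dropLast_sublist mem).mem ha
      have hanem : ∀ a ∈ mem.dropLast, a ≠ m := by
        intro a ha heq; rw [hm_eq] at heq; exact hlastnotin (heq ▸ ha)
      have hanep : ∀ a ∈ mem.dropLast, a ≠ pagina := by
        intro a ha heq; exact hm (heq ▸ hmemdrop a ha)
      simp only [MRU_step, MRU_alt_step, hA, hB, Bool.false_eq_true, if_false, hsize,
        if_pos hfull, hmmax]
      rw [pvPop_dropLast mem hne]
      refine ⟨by trivial, by trivial, ?_, ?_, ?_, ?_, ?_⟩
      · exact pvNodupAppendSingleton ((List.dropLast_sublist mem).nodup hnd)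
          (fun hin => hanep pagina hin rfl)
      · rw [hkeysI, hkeysE]
        refine pvNodupAppendSingleton (hknd.filter _) ?_
        intro hin
        exact hm (hperm.mem_iff.mp (List.mem_of_mem_filter hin))
      · rw [hkeysI]
        exact hpermE.append (List.Perm.refl _)
      · rw [List.pairwise_append]
        refine ⟨?_, List.pairwise_singleton _ _, ?_⟩
        · refine (List.Pairwise.sublist (List.dropLast_sublist mem) hpw).imp_of_mem ?_
          intro a b ha hb hab
          rw [hgd a (hanem a ha), hgd b (hanem b hb),
            if_neg (hanep a ha), if_neg (hanep b hb)]
          exact hab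
        · intro a ha b hb
          rw [List.mem_singleton.mp hb, hgdp, hgd a (hanem a ha), if_neg (hanep a ha)]
          have := hbnd a (hmemdrop a ha); omega
      · intro k hk
        rcases List.mem_append.mp hk with hk1 | hk2
        · rw [hgd k (hanem k hk1), if_neg (hanep k hk1)]
          have := hbnd k (hmemdrop k hk1); omega
        · rw [List.mem_singleton.mp hk2, hgdp]
    -- ===== miss without eviction =====
    · have hkeysI : (d.insert pagina (t + 1)).keys = d.keys ++ [pagina] :=
        PySem.Dict.keys_insert_of_not_contains d _ hB
      have hgd : ∀ a : Int, (d.insert pagina (t + 1)).getD a 0 =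
          if a = pagina then t + 1 else d.getD a 0 := fun a =>
        PySem.Dict.getD_insert d pagina a (t + 1) 0
      have hfull' : ¬ quadros ≤ (d.size : Int) := by rw [hsize]; exact hfull
      simp only [MRU_step, MRU_alt_step, hA, hB, Bool.false_eq_true, if_false,
        if_neg hfull, if_neg hfull']
      refine ⟨by trivial, by trivial, ?_, ?_, ?_, ?_, ?_⟩
      · exact pvNodupAppendSingleton hnd hm
      · rw [hkeysI]
        exact pvNodupAppendSingleton hknd (fun hin => hm (hperm.mem_iff.mp hin))
      · rw [hkeysI]; exact hperm.append (List.Perm.refl _)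
      · rw [List.pairwise_append]
        refine ⟨?_, List.pairwise_singleton _ _, ?_⟩
        · refine hpw.imp_of_mem ?_
          intro a b ha hb hab
          have ha' : a ≠ pagina := fun heq => hm (heq ▸ ha)
          have hb' : b ≠ pagina := fun heq => hm (heq ▸ hb)
          rw [hgd a, hgd b, if_neg ha', if_neg hb']; exact hab
        · intro a ha b hb
          have ha' : a ≠ pagina := fun heq => hm (heq ▸ ha)
          rw [List.mem_singleton.mp hb, hgd a, hgd pagina, if_neg ha', if_pos rfl]
          have := hbnd a ha; omega
      · intro k hk
        rcases List.mem_append.mp hk with hk1 | hk2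
        · have hk' : k ≠ pagina := fun heq => hm (heq ▸ hk1)
          rw [hgd k, if_neg hk']
          have := hbnd k hk1; omega
        · rw [List.mem_singleton.mp hk2, hgd pagina, if_pos rfl]

lemma pvFold_inv (quadros : Int) (hq : 1 ≤ quadros) :
    ∀ (seq : List Int) (mem : List Int) (f t : Int) (d : PySem.Dict Int Int),
      pvInv t mem d →
      (seq.foldl (MRU_step quadros) (mem, f)).2 = (seq.foldl (MRU_alt_step quadros) (d, t, f)).2.2 ∧
      pvInv ((seq.foldl (MRU_alt_step quadros) (d, t, f)).2.1)
        ((seq.foldl (MRU_step quadros) (mem, f)).1)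
        ((seq.foldl (MRU_alt_step quadros) (d, t, f)).1) := by
  intro seq
  induction seq with
  | nil => intro mem f t d h; exact ⟨rfl, h⟩
  | cons p rest ih =>
    intro mem f t d h
    obtain ⟨h1, h2, h3⟩ := pvStep_inv quadros hq p t f mem d h
    simp only [List.foldl_cons]
    have hB : MRU_alt_step quadros (d, t, f) p =
        ((MRU_alt_step quadros (d, t, f) p).1, t + 1, (MRU_step quadros (mem, f) p).2) := by
      rw [← h2, h1]
    have hA : MRU_step quadros (mem, f) p =
        ((MRU_step quadros (mem, f) p).1, (MRU_step quadros (mem, f) p).2) := rfl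
    rw [hA, hB]
    exact ih _ _ _ _ h3

-- ===== VERDICT (by name: the statement is the Claim_ definition above) =====
theorem MRU_spec : Claim_equal_MRU := by
  intro seq q _ hpre
  unfold Spec_MRU
  rcases hpre with h | hq
  · subst h; rfl
  · have h := pvFold_inv q hq seq [] 0 0 PySem.Dict.empty
      (by refine ⟨List.nodup_nil, ?_, ?_, List.Pairwise.nil, by simp⟩ <;> simp [PySem.Dict.keys, PySem.Dict.empty])
    obtain ⟨hf, _, hnd, hperm, hpw, _⟩ := h
    unfold MRU MRU_alt
    refine Prod.ext ?_ hf
    exact (PySem.List.sorted_eq_of_perm_of_pairwise_lt _ _ _ hperm.symm hpw).symm
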